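-- pv_equiv track=rewrite | github.com/MulliganB/PythonLongestWord | longestWord.py | sentenceIntoWords
-- ===== SOURCE A (Python) =====
-- def sentenceIntoWords(sen):
--     wordList = []
--     letter = ""
--     index = 0
--     i = 0
--     while index <= len(sen)-1:
--         letterChoice = sen[index]
--         if(((ord(letterChoice) >= 65) and (ord(letterChoice) <= 90)) or ((ord(letterChoice) >= 97) and (ord(letterChoice) <= 122))) :
--             letter += sen[index]
--             index += 1
--         elif ((ord(letterChoice) == 32)) :
--             wordList.append(letter)
--             letter = ""
--             index += 1
--             i += 1
--         else :
--             index += 1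
--         if (index == len(sen)) :
--             wordList.append(letter)
--             letter = ""
--     return wordList
-- ===== SOURCE B (Python) =====
-- def sentenceIntoWords(sen):
--     if not sen:
--         return []
--     return ["".join(c for c in seg if 'A' <= c <= 'Z' or 'a' <= c <= 'z')
--             for seg in sen.split(' ')]
-- ===== Notes on version B (the rewrite author's own statement) =====
-- stated objective: idiomatic
-- what changed: Replaced the index-driven single-pass state machine (manual per-character letter accumulator and index bookkeeping, end-of-string re-check) by a two-phase computation: C-level str.split(' ') then a letter-filtering comprehension per segment, with an explicit [] for the empty string.
import Mathlib
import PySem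

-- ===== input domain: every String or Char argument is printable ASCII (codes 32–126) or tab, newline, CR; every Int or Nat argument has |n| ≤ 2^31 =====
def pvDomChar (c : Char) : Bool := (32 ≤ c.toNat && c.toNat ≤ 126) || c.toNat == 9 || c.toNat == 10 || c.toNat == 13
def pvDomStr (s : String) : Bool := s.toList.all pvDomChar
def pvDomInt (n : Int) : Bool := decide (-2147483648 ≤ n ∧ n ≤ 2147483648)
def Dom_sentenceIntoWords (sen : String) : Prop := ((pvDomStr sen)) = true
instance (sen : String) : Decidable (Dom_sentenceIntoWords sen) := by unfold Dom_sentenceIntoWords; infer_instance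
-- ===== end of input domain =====

-- B replaces A's index-driven letter-accumulator state machine by a split-on-space then
-- filter-letters comprehension; same O(n) algorithmic class, measurably faster in CPython (timed by the check).


-- ===== PORT A =====
-- A's while loop over `index`, transcribed as structural recursion over the remaining
-- characters (same state: wordList, letter; Python's `letter` string kept as its char list).
-- Each branch increments `index`; the trailing `if index == len(sen)` check corresponds to the
-- remaining list becoming empty after the current character is processed.
def sentenceIntoWordsLoop : List Char → List String → List Char → List String
  | [], wordList, _ => wordList
  | c :: rest, wordList, letter =>
    let st : List String × List Char :=
      if ((65 ≤ c.toNat && c.toNat ≤ 90) || (97 ≤ c.toNat && c.toNat ≤ 122)) then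
        (wordList, letter ++ [c])
      else if c.toNat = 32 then
        (wordList ++ [String.ofList letter], [])
      else
        (wordList, letter)
    if rest.isEmpty then st.1 ++ [String.ofList st.2] else sentenceIntoWordsLoop rest st.1 st.2

def sentenceIntoWords (sen : String) : List String :=
  sentenceIntoWordsLoop sen.toList [] []

-- ===== PORT B =====
-- B's letter test: 'A' <= c <= 'Z' or 'a' <= c <= 'z'
def pvIsLetterB (c : Char) : Bool := ('A' ≤ c && c ≤ 'Z') || ('a' ≤ c && c ≤ 'z')

def sentenceIntoWords_alt (sen : String) : List String :=
  if sen = "" then []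
  else (PySem.Chars.splitOn sen.toList [' ']).map
         (fun seg => String.ofList (seg.filter pvIsLetterB))

-- ===== PRECONDITION & SPEC =====
def Spec_sentenceIntoWords (sen : String) (out : List String) : Prop := out = sentenceIntoWords_alt sen
instance (sen : String) (out : List String) : Decidable (Spec_sentenceIntoWords sen out) := by unfold Spec_sentenceIntoWords; infer_instance

-- ===== CLAIM (what is proved, stated in full; the proofs are below) =====
def Claim_equal_sentenceIntoWords : Prop := ∀ (sen : String), Dom_sentenceIntoWords sen → Spec_sentenceIntoWords sen (sentenceIntoWords sen)

-- ===== LEMMAS AND PROOFS =====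

-- simple recursion computing Python's split(' ') (empties kept)
def splitSp : List Char → List (List Char)
  | [] => [[]]
  | c :: rest => if c = ' ' then [] :: splitSp rest else (splitSp rest).modifyHead (c :: ·)

theorem splitSp_space (l : List Char) : splitSp (' ' :: l) = [] :: splitSp l := by
  simp [splitSp]

theorem splitSp_char (c : Char) (l : List Char) (hc : c ≠ ' ') :
    splitSp (c :: l) = (splitSp l).modifyHead (c :: ·) := by
  simp [splitSp, hc]

theorem splitSp_ne_nil (l : List Char) : splitSp l ≠ [] := by
  cases l with
  | nil => simp [splitSp]
  | cons c rest =>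
    simp only [splitSp]
    split
    · simp
    · cases h : splitSp rest with
      | nil => exact absurd h (splitSp_ne_nil rest)
      | cons a t => simp [List.modifyHead]

theorem splitOn_go_eq (fuel : Nat) (l cur : List Char) (acc : List (List Char))
    (h : l.length < fuel) :
    PySem.Chars.splitOn.go [' '] fuel l cur acc
      = acc.reverse ++ (splitSp l).modifyHead (cur.reverse ++ ·) := by
  induction fuel generalizing l cur acc with
  | zero => omega
  | succ f ih =>
    cases l with
    | nil => simp [PySem.Chars.splitOn.go, splitSp, List.modifyHead]
    | cons c rest =>
      simp only [PySem.Chars.splitOn.go]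
      by_cases hc : c = ' '
      · subst hc
        have hpre : ([' '].isPrefixOf (' ' :: rest)) = true := by
          simp [List.isPrefixOf]
        rw [if_pos hpre]
        simp only [List.length_cons] at h
        rw [show List.drop [' '].length (' ' :: rest) = rest from rfl]
        rw [ih rest [] (cur.reverse :: acc) (by omega)]
        simp only [splitSp_space, List.modifyHead, List.reverse_cons, List.reverse_nil,
          List.nil_append, List.append_assoc, List.cons_append]
        cases splitSp rest <;> simp
      · have hpre : ([' '].isPrefixOf (c :: rest)) = false := by
          simp [List.isPrefixOf]
          exact fun h' => (hc h'.symm).elim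
        rw [if_neg (by simp [hpre])]
        simp only [List.length_cons] at h
        rw [ih rest (c :: cur) acc (by omega)]
        rw [splitSp_char c rest hc]
        cases hs : splitSp rest with
        | nil => exact absurd hs (splitSp_ne_nil rest)
        | cons a t => simp [List.modifyHead]

theorem splitOn_eq_splitSp (l : List Char) :
    PySem.Chars.splitOn l [' '] = splitSp l := by
  show PySem.Chars.splitOn.go [' '] (l.length + 1) l [] [] = _
  rw [splitOn_go_eq (l.length + 1) l [] [] (by omega)]
  cases h : splitSp l with
  | nil => exact absurd h (splitSp_ne_nil l)
  | cons a t => simp [List.modifyHead]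

-- A's numeric letter test coincides with B's char-literal one
theorem letter_test_eq (c : Char) :
    ((65 ≤ c.toNat && c.toNat ≤ 90) || (97 ≤ c.toNat && c.toNat ≤ 122)) = pvIsLetterB c := by
  have hA : (('A':Char) ≤ c) ↔ 65 ≤ c.toNat := by rw [Char.le_def, UInt32.le_iff_toNat_le]; rfl
  have hZ : (c ≤ ('Z':Char)) ↔ c.toNat ≤ 90 := by rw [Char.le_def, UInt32.le_iff_toNat_le]; rfl
  have ha : (('a':Char) ≤ c) ↔ 97 ≤ c.toNat := by rw [Char.le_def, UInt32.le_iff_toNat_le]; rfl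
  have hz : (c ≤ ('z':Char)) ↔ c.toNat ≤ 122 := by rw [Char.le_def, UInt32.le_iff_toNat_le]; rfl
  simp [pvIsLetterB, hA, hZ, ha, hz]

theorem char_eq_space_iff (c : Char) : c.toNat = 32 ↔ c = ' ' := by
  constructor
  · intro h
    apply Char.ext
    apply UInt32.toNat_inj.mp
    exact h
  · rintro rfl; rfl

-- the central loop/split correspondence
theorem loop_eq (cs : List Char) (wl : List String) (lt : List Char) (hcs : cs ≠ []) :
    sentenceIntoWordsLoop cs wl lt
      = wl ++ (match splitSp cs with
               | [] => []
               | h :: t => String.ofList (lt ++ h.filter pvIsLetterB)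
                             :: t.map (fun seg => String.ofList (seg.filter pvIsLetterB))) := by
  induction cs generalizing wl lt with
  | nil => exact absurd rfl hcs
  | cons c rest ih =>
    simp only [sentenceIntoWordsLoop]
    by_cases hL : ((65 ≤ c.toNat && c.toNat ≤ 90) || (97 ≤ c.toNat && c.toNat ≤ 122)) = true
    · -- letter branch
      have hLB : pvIsLetterB c = true := by rw [← letter_test_eq]; exact hL
      have hcsp : c ≠ ' ' := by
        intro h; subst h; simp [pvIsLetterB] at hLB
      rw [if_pos hL, splitSp_char c rest hcsp]
      cases rest with
      | nil => simp [splitSp, List.modifyHead, hLB]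
      | cons d rest' =>
        rw [if_neg (by simp)]
        rw [ih _ _ (by simp)]
        cases hs : splitSp (d :: rest') with
        | nil => exact absurd hs (splitSp_ne_nil _)
        | cons h t =>
          simp [List.modifyHead, hLB]
    · rw [if_neg hL]
      by_cases hsp : c.toNat = 32
      · -- space branch
        have hc : c = ' ' := (char_eq_space_iff c).mp hsp
        subst hc
        rw [if_pos hsp, splitSp_space]
        cases rest with
        | nil => simp [splitSp]
        | cons d rest' =>
          rw [if_neg (by simp)]
          rw [ih _ _ (by simp)]
          cases hs : splitSp (d :: rest') with
          | nil => exact absurd hs (splitSp_ne_nil _)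
          | cons h t => simp
      · -- other-character branch
        have hLB : pvIsLetterB c = false := by
          rw [← letter_test_eq]; simpa using hL
        have hcsp : c ≠ ' ' := by
          intro h; subst h; exact hsp rfl
        rw [if_neg hsp, splitSp_char c rest hcsp]
        cases rest with
        | nil => simp [splitSp, List.modifyHead, hLB]
        | cons d rest' =>
          rw [if_neg (by simp)]
          rw [ih _ _ (by simp)]
          cases hs : splitSp (d :: rest') with
          | nil => exact absurd hs (splitSp_ne_nil _)
          | cons h t =>
            simp [List.modifyHead, hLB]

-- ===== VERDICT (by name: the statement is the Claim_ definition above) =====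
theorem sentenceIntoWords_spec : Claim_equal_sentenceIntoWords := by
  intro sen _
  show sentenceIntoWords sen = sentenceIntoWords_alt sen
  unfold sentenceIntoWords sentenceIntoWords_alt
  by_cases h : sen = ""
  · subst h; simp [sentenceIntoWordsLoop]
  · rw [if_neg h]
    have hl : sen.toList ≠ [] := by
      intro h'; exact h (by simpa using congrArg String.ofList h')
    rw [splitOn_eq_splitSp, loop_eq sen.toList [] [] hl]
    cases hs : splitSp sen.toList with
    | nil => exact absurd hs (splitSp_ne_nil _)
    | cons a t => simp
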